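-- pv_equiv track=rewrite | github.com/RiddlenBaba/abbababa | scripts/content-research-agent.py | _extract_business_trend_name
-- ===== SOURCE A (Python) =====
-- def _extract_business_trend_name(title: str, category: str) -> str:
--     """Extract a meaningful business trend name from article title"""
--     title_lower = title.lower()
--
--     # AI-specific trend names
--     if any(term in title_lower for term in ["gpt", "claude", "llm", "generative ai", "ai model"]):
--         return "Generative AI Advancement"
--     elif any(term in title_lower for term in ["ai agent", "agentic", "autonomous ai"]):
--         return "AI Agent Technology"
--     elif any(term in title_lower for term in ["ai api", "ai integration", "ai platform"]):
--         return "AI Integration Platform"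
--     elif "chatbot" in title_lower or "conversational ai" in title_lower:
--         return "Conversational AI"
--     elif "computer vision" in title_lower or "image ai" in title_lower:
--         return "AI Vision Technology"
--
--     # Business process trends
--     elif any(term in title_lower for term in ["automation", "workflow", "process"]):
--         return "Business Process Automation"
--     elif any(term in title_lower for term in ["api", "integration", "system"]):
--         return "System Integration Technology"
--     elif any(term in title_lower for term in ["data", "analytics", "insight"]):
--         return "Data Intelligence Platform"
--
--     # Industry-specific trends
--     elif any(term in title_lower for term in ["fintech", "financial", "banking"]):
--         return "Financial Technology Innovation"
--     elif any(term in title_lower for term in ["marketing", "customer", "engagement"]):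
--         return "Customer Engagement Technology"
--     elif any(term in title_lower for term in ["security", "cybersecurity", "privacy"]):
--         return "AI Security Framework"
--
--     # Web3/Blockchain trends
--     elif any(term in title_lower for term in ["blockchain", "crypto", "web3", "defi"]):
--         return "Blockchain Innovation"
--
--     # Developer tools
--     elif any(term in title_lower for term in ["developer", "coding", "programming"]):
--         return "Developer Tool Enhancement"
--
--     # Fallback based on category
--     elif "ai" in category:
--         return "AI Technology Advancement"
--     elif "business" in category:
--         return "Business Innovation"
--     elif "web3" in category:
--         return "Web3 Development"
--     else:
--         return "Technology Innovation"
-- ===== SOURCE B (Python) =====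
-- # Different algorithm: instead of testing each rule's substrings against the
-- # title one rule at a time (first-match chain), scan the TEXT once position by
-- # position; at each position check which keywords start there and keep the
-- # minimum rule rank seen.  The answer is the name of the minimal matched rank
-- # (rule order is preserved as rank order), falling back to a category scan.
--
-- _TITLE_RULES = [
--     (("gpt", "claude", "llm", "generative ai", "ai model"), "Generative AI Advancement"),
--     (("ai agent", "agentic", "autonomous ai"), "AI Agent Technology"),
--     (("ai api", "ai integration", "ai platform"), "AI Integration Platform"),
--     (("chatbot", "conversational ai"), "Conversational AI"),
--     (("computer vision", "image ai"), "AI Vision Technology"),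
--     (("automation", "workflow", "process"), "Business Process Automation"),
--     (("api", "integration", "system"), "System Integration Technology"),
--     (("data", "analytics", "insight"), "Data Intelligence Platform"),
--     (("fintech", "financial", "banking"), "Financial Technology Innovation"),
--     (("marketing", "customer", "engagement"), "Customer Engagement Technology"),
--     (("security", "cybersecurity", "privacy"), "AI Security Framework"),
--     (("blockchain", "crypto", "web3", "defi"), "Blockchain Innovation"),
--     (("developer", "coding", "programming"), "Developer Tool Enhancement"),
-- ]
-- _CAT_RULES = [
--     (("ai",), "AI Technology Advancement"),
--     (("business",), "Business Innovation"),
--     (("web3",), "Web3 Development"),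
-- ]
-- _TITLE_TERMS = [(t, i) for i, (ts, _) in enumerate(_TITLE_RULES) for t in ts]
-- _TITLE_NAMES = [name for _, name in _TITLE_RULES]
-- _CAT_TERMS = [(t, i) for i, (ts, _) in enumerate(_CAT_RULES) for t in ts]
-- _CAT_NAMES = [name for _, name in _CAT_RULES]
--
--
-- def _best_rank(text, terms):
--     """Single scan over text positions; min rank of any keyword starting there."""
--     best = None
--     for pos in range(len(text)):
--         for term, rank in terms:
--             if text.startswith(term, pos):
--                 best = rank if best is None else min(best, rank)
--     return best
--
--
-- def _extract_business_trend_name(title: str, category: str) -> str: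
--     r = _best_rank(title.lower(), _TITLE_TERMS)
--     if r is not None:
--         return _TITLE_NAMES[r]
--     r = _best_rank(category, _CAT_TERMS)
--     return _CAT_NAMES[r] if r is not None else "Technology Innovation"
-- ===== Notes on version B (the rewrite author's own statement) =====
-- stated objective: alternative
-- what changed: Replaced the per-rule substring-containment if/elif chain by a single positional scan of the text: every position is checked for keywords starting there and the minimal matched rule rank (rule order = rank order) selects the name, with the same scan reused on the category for the fallback.
import Mathlib
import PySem

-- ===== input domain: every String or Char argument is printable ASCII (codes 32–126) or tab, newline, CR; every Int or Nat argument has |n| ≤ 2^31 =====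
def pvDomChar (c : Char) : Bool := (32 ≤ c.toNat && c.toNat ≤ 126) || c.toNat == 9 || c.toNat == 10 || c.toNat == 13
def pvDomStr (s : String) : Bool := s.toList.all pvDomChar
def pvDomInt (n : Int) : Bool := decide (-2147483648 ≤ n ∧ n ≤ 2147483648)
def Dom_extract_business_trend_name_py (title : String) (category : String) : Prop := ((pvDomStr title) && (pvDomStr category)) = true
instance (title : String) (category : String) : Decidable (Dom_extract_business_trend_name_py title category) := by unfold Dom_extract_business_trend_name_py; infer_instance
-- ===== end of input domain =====

-- B replaces A's per-rule if/elif containment chain by a single positional scan of the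
-- text keeping the minimal matched rule rank (alternative algorithm, same cost class).

-- ===== PORT A =====
def extract_business_trend_name_py (title : String) (category : String) : String :=
  let title_lower := PySem.Str.lower title
  if ["gpt", "claude", "llm", "generative ai", "ai model"].any (fun term => PySem.Str.isIn term title_lower) then
    "Generative AI Advancement"
  else if ["ai agent", "agentic", "autonomous ai"].any (fun term => PySem.Str.isIn term title_lower) then
    "AI Agent Technology"
  else if ["ai api", "ai integration", "ai platform"].any (fun term => PySem.Str.isIn term title_lower) then
    "AI Integration Platform"
  else if PySem.Str.isIn "chatbot" title_lower || PySem.Str.isIn "conversational ai" title_lower then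
    "Conversational AI"
  else if PySem.Str.isIn "computer vision" title_lower || PySem.Str.isIn "image ai" title_lower then
    "AI Vision Technology"
  else if ["automation", "workflow", "process"].any (fun term => PySem.Str.isIn term title_lower) then
    "Business Process Automation"
  else if ["api", "integration", "system"].any (fun term => PySem.Str.isIn term title_lower) then
    "System Integration Technology"
  else if ["data", "analytics", "insight"].any (fun term => PySem.Str.isIn term title_lower) then
    "Data Intelligence Platform"
  else if ["fintech", "financial", "banking"].any (fun term => PySem.Str.isIn term title_lower) then
    "Financial Technology Innovation"
  else if ["marketing", "customer", "engagement"].any (fun term => PySem.Str.isIn term title_lower) then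
    "Customer Engagement Technology"
  else if ["security", "cybersecurity", "privacy"].any (fun term => PySem.Str.isIn term title_lower) then
    "AI Security Framework"
  else if ["blockchain", "crypto", "web3", "defi"].any (fun term => PySem.Str.isIn term title_lower) then
    "Blockchain Innovation"
  else if ["developer", "coding", "programming"].any (fun term => PySem.Str.isIn term title_lower) then
    "Developer Tool Enhancement"
  else if PySem.Str.isIn "ai" category then
    "AI Technology Advancement"
  else if PySem.Str.isIn "business" category then
    "Business Innovation"
  else if PySem.Str.isIn "web3" category then
    "Web3 Development"
  else
    "Technology Innovation"

-- ===== PORT B =====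
def pvTitleRules : List (List String × String) :=
  [ (["gpt", "claude", "llm", "generative ai", "ai model"], "Generative AI Advancement"),
    (["ai agent", "agentic", "autonomous ai"], "AI Agent Technology"),
    (["ai api", "ai integration", "ai platform"], "AI Integration Platform"),
    (["chatbot", "conversational ai"], "Conversational AI"),
    (["computer vision", "image ai"], "AI Vision Technology"),
    (["automation", "workflow", "process"], "Business Process Automation"),
    (["api", "integration", "system"], "System Integration Technology"),
    (["data", "analytics", "insight"], "Data Intelligence Platform"),
    (["fintech", "financial", "banking"], "Financial Technology Innovation"),
    (["marketing", "customer", "engagement"], "Customer Engagement Technology"),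
    (["security", "cybersecurity", "privacy"], "AI Security Framework"),
    (["blockchain", "crypto", "web3", "defi"], "Blockchain Innovation"),
    (["developer", "coding", "programming"], "Developer Tool Enhancement") ]

def pvCatRules : List (List String × String) :=
  [ (["ai"], "AI Technology Advancement"),
    (["business"], "Business Innovation"),
    (["web3"], "Web3 Development") ]

-- the flattening comprehension [(t, i) for i, (ts, _) in enumerate(rules) for t in ts]
def pvFlatten (i : Nat) : List (List String × String) → List (List Char × Nat)
  | [] => []
  | (ts, _) :: rest => ts.map (fun t => (t.toList, i)) ++ pvFlatten (i + 1) rest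

def pvTitleTerms : List (List Char × Nat) := pvFlatten 0 pvTitleRules
def pvTitleNames : List String := pvTitleRules.map Prod.snd
def pvCatTerms : List (List Char × Nat) := pvFlatten 0 pvCatRules
def pvCatNames : List String := pvCatRules.map Prod.snd

-- best = rank if best is None else min(best, rank)
def pvOptMin : Option Nat → Nat → Option Nat
  | none, r => some r
  | some b, r => some (min b r)

-- _best_rank: single scan over text positions; Python's text.startswith(term, pos)
-- (0 ≤ pos) is exactly PySem.Chars.startswith (text.drop pos) term on code points.
def pvBestRank (text : List Char) (terms : List (List Char × Nat)) : Option Nat :=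
  (List.range text.length).foldl
    (fun best pos =>
      terms.foldl
        (fun best p =>
          if PySem.Chars.startswith (text.drop pos) p.1 then pvOptMin best p.2 else best)
        best)
    none

-- _TITLE_NAMES[r]: r is always a valid rank (< number of rules), so Python never
-- raises; the default of getD is unreachable.
def extract_business_trend_name_py_alt (title : String) (category : String) : String :=
  match pvBestRank (PySem.Str.lower title).toList pvTitleTerms with
  | some r => pvTitleNames.getD r "Technology Innovation"
  | none =>
    match pvBestRank category.toList pvCatTerms with
    | some r => pvCatNames.getD r "Technology Innovation"
    | none => "Technology Innovation"

-- ===== PRECONDITION & SPEC =====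
def Spec_extract_business_trend_name_py (title : String) (category : String) (out : String) : Prop := out = extract_business_trend_name_py_alt title category
instance (title : String) (category : String) (out : String) : Decidable (Spec_extract_business_trend_name_py title category out) := by unfold Spec_extract_business_trend_name_py; infer_instance

-- ===== CLAIM (what is proved, stated in full; the proofs are below) =====
def Claim_equal_extract_business_trend_name_py : Prop := ∀ (title : String) (category : String), Dom_extract_business_trend_name_py title category → Spec_extract_business_trend_name_py title category (extract_business_trend_name_py title category)

-- ===== LEMMAS AND PROOFS =====

-- folding pvOptMin from none computes the minimum of the list
theorem pv_foldl_optMin_some (l : List Nat) (a : Nat) :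
    l.foldl pvOptMin (some a) = some (l.foldl min a) := by
  induction l generalizing a with
  | nil => rfl
  | cons x xs ih => simp [pvOptMin, ih]

theorem pv_foldl_optMin_none (l : List Nat) :
    l.foldl pvOptMin none = l.min? := by
  cases l with
  | nil => rfl
  | cons x xs => simp [List.min?, pvOptMin, pv_foldl_optMin_some]

-- min? depends only on membership (over Nat)
theorem pv_min?_congr (l₁ l₂ : List Nat) (h : ∀ x, x ∈ l₁ ↔ x ∈ l₂) :
    l₁.min? = l₂.min? := by
  cases h₁ : l₁.min? with
  | none =>
    rw [List.min?_eq_none_iff] at h₁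
    subst h₁
    symm
    rw [List.min?_eq_none_iff]
    cases l₂ with
    | nil => rfl
    | cons y ys => exact absurd ((h y).mpr (by simp)) (by simp)
  | some a =>
    rw [List.min?_eq_some_iff] at h₁
    symm
    rw [List.min?_eq_some_iff]
    exact ⟨(h a).mp h₁.1, fun b hb => h₁.2 b ((h b).mpr hb)⟩

-- the positional scan computes min? of the matched ranks (containment form)
theorem pv_bestRank_eq_min? (text : List Char) (terms : List (List Char × Nat))
    (hne : ∀ p ∈ terms, p.1 ≠ []) :
    pvBestRank text terms =
      ((terms.filter (fun p : List Char × Nat => PySem.Chars.isIn p.1 text)).map Prod.snd).min? := by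
  unfold pvBestRank
  have h1 : ∀ (b : Option Nat) (pos : Nat),
      terms.foldl (fun best p =>
        if PySem.Chars.startswith (text.drop pos) p.1 then pvOptMin best p.2 else best) b
      = ((terms.filter (fun p => PySem.Chars.startswith (text.drop pos) p.1)).map
          Prod.snd).foldl pvOptMin b := by
    intro b pos
    rw [List.foldl_map, List.foldl_filter]
  calc (List.range text.length).foldl
        (fun best pos =>
          terms.foldl (fun best p =>
            if PySem.Chars.startswith (text.drop pos) p.1 then pvOptMin best p.2 else best)
            best) none
      = (((List.range text.length).flatMap (fun pos =>
            (terms.filter (fun p => PySem.Chars.startswith (text.drop pos) p.1)).map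
              Prod.snd))).foldl pvOptMin none := by
        rw [List.foldl_flatMap]
        exact List.foldl_ext _ _ none (fun b pos _ => h1 b pos)
    _ = _ := by
        rw [pv_foldl_optMin_none]
        apply pv_min?_congr
        intro r
        simp only [List.mem_flatMap, List.mem_map, List.mem_filter, List.mem_range]
        constructor
        · rintro ⟨pos, hpos, p, ⟨hp, hsw⟩, hr⟩
          refine ⟨p, ⟨hp, ?_⟩, hr⟩
          rw [← PySem.Chars.exists_prefix_drop_iff_isIn]
          exact ⟨pos, (PySem.Chars.startswith_iff _ _).mp hsw⟩
        · rintro ⟨p, ⟨hp, hin⟩, hr⟩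
          rw [← PySem.Chars.exists_prefix_drop_iff_isIn] at hin
          obtain ⟨j, hj⟩ := hin
          have hjlt : j < text.length := by
            by_contra hge
            rw [Nat.not_lt] at hge
            rw [List.drop_eq_nil_of_le hge] at hj
            exact hne p hp (List.prefix_nil.mp hj)
          exact ⟨j, hjlt, p, ⟨hp, (PySem.Chars.startswith_iff _ _).mpr hj⟩, hr⟩

-- shifting the start index of the flattening adds one to every rank
theorem pv_flatten_succ (i : Nat) (rules : List (List String × String)) :
    pvFlatten (i + 1) rules = (pvFlatten i rules).map (fun p : List Char × Nat => (p.1, p.2 + 1)) := by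
  induction rules generalizing i with
  | nil => rfl
  | cons r rest ih =>
    cases r with
    | mk ts n => simp [pvFlatten, ih, List.map_map, Function.comp]

-- the first-match chain over grouped rules (A's shape)
def pvChain (text : List Char) (fallback : String) : List (List String × String) → String
  | [] => fallback
  | (ts, n) :: rest =>
      if ts.any (fun t : String => PySem.Chars.isIn t.toList text) then n
      else pvChain text fallback rest

theorem pv_min?_map_succ (l : List Nat) :
    (l.map (fun x => x + 1)).min? = l.min?.map (fun x => x + 1) := by
  cases hl : l.min? with
  | none => rw [List.min?_eq_none_iff] at hl; subst hl; rfl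
  | some a =>
    rw [List.min?_eq_some_iff] at hl
    simp only [Option.map_some]
    rw [List.min?_eq_some_iff]
    exact ⟨List.mem_map_of_mem hl.1, by
      rintro b hb
      obtain ⟨x, hx, rfl⟩ := List.mem_map.mp hb
      exact Nat.succ_le_succ (hl.2 x hx)⟩

-- name of the minimal matched rank = first-match chain
theorem pv_min_rank_eq_chain (text : List Char) (d f : String)
    (rules : List (List String × String)) :
    (match (((pvFlatten 0 rules).filter (fun p : List Char × Nat => PySem.Chars.isIn p.1 text)).map
        Prod.snd).min? with
     | some r => (rules.map Prod.snd).getD r d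
     | none => f)
    = pvChain text f rules := by
  induction rules with
  | nil => rfl
  | cons r rest ih =>
    cases r with
    | mk ts n =>
      rw [pvChain]
      have hflat : pvFlatten 0 ((ts, n) :: rest)
          = ts.map (fun t : String => (t.toList, 0)) ++ (pvFlatten 0 rest).map (fun p : List Char × Nat => (p.1, p.2 + 1)) := by
        rw [pvFlatten, pv_flatten_succ]
      rw [hflat, List.filter_append, List.map_append]
      have hfmap : ((pvFlatten 0 rest).map (fun p : List Char × Nat => (p.1, p.2 + 1))).filter
            (fun p : List Char × Nat => PySem.Chars.isIn p.1 text)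
          = ((pvFlatten 0 rest).filter (fun p : List Char × Nat => PySem.Chars.isIn p.1 text)).map
              (fun p : List Char × Nat => (p.1, p.2 + 1)) := by
        rw [List.filter_map]
        rfl
      have htmap : (ts.map (fun t : String => (t.toList, 0))).filter (fun p : List Char × Nat => PySem.Chars.isIn p.1 text)
          = (ts.filter (fun t : String => PySem.Chars.isIn t.toList text)).map (fun t : String => (t.toList, 0)) := by
        rw [List.filter_map]
        rfl
      rw [hfmap, htmap]
      by_cases hany : ts.any (fun t : String => PySem.Chars.isIn t.toList text)
      · -- head rule matches: 0 is present, so min? = some 0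
        obtain ⟨t0, ht0, ht0in⟩ := List.any_eq_true.mp hany
        have h0mem : (0 : Nat) ∈ ((ts.filter (fun t : String => PySem.Chars.isIn t.toList text)).map
            (fun t : String => (t.toList, 0))).map Prod.snd ++
            (((pvFlatten 0 rest).filter (fun p : List Char × Nat => PySem.Chars.isIn p.1 text)).map
              (fun p : List Char × Nat => (p.1, p.2 + 1))).map Prod.snd := by
          apply List.mem_append_left
          simp only [List.map_map, List.mem_map, List.mem_filter]
          exact ⟨t0, ⟨ht0, ht0in⟩, rfl⟩
        have hmin : (((ts.filter (fun t : String => PySem.Chars.isIn t.toList text)).map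
            (fun t : String => (t.toList, 0))).map Prod.snd ++
            (((pvFlatten 0 rest).filter (fun p : List Char × Nat => PySem.Chars.isIn p.1 text)).map
              (fun p : List Char × Nat => (p.1, p.2 + 1))).map Prod.snd).min? = some 0 := by
          rw [List.min?_eq_some_iff]
          exact ⟨h0mem, fun b _ => Nat.zero_le b⟩
        rw [hmin]
        simp [hany]
      · -- head rule does not match: its filter is empty, ranks shift by one
        have hts : ts.filter (fun t : String => PySem.Chars.isIn t.toList text) = [] := by
          rw [List.filter_eq_nil_iff]
          intro t ht
          simp only [List.any_eq_true, not_exists, not_and] at hany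
          simp [hany t ht]
        rw [hts]
        simp only [List.map_nil, List.nil_append]
        have : (((pvFlatten 0 rest).filter (fun p : List Char × Nat => PySem.Chars.isIn p.1 text)).map
            (fun p : List Char × Nat => (p.1, p.2 + 1))).map Prod.snd
            = (((pvFlatten 0 rest).filter (fun p : List Char × Nat => PySem.Chars.isIn p.1 text)).map
                Prod.snd).map (fun x => x + 1) := by
          simp [List.map_map, Function.comp]
        rw [this, pv_min?_map_succ]
        rw [← ih]
        simp only [Bool.not_eq_true] at hany
        cases hmr : (((pvFlatten 0 rest).filter (fun p : List Char × Nat => PySem.Chars.isIn p.1 text)).map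
            Prod.snd).min? with
        | none => simp [hany]
        | some r => simp [hany]

-- the scan result with name lookup = the chain, for rules with nonempty keywords
theorem pv_scan_eq_chain (text : List Char) (d f : String)
    (rules : List (List String × String))
    (hne : ∀ p ∈ pvFlatten 0 rules, p.1 ≠ []) :
    (match pvBestRank text (pvFlatten 0 rules) with
     | some r => (rules.map Prod.snd).getD r d
     | none => f)
    = pvChain text f rules := by
  rw [pv_bestRank_eq_min? text _ hne]
  exact pv_min_rank_eq_chain text d f rules

-- ===== VERDICT (by name: the statement is the Claim_ definition above) =====
theorem extract_business_trend_name_py_spec : Claim_equal_extract_business_trend_name_py := by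
  intro title category _
  show extract_business_trend_name_py title category = extract_business_trend_name_py_alt title category
  have hne1 : ∀ p ∈ pvFlatten 0 pvTitleRules, p.1 ≠ [] := by decide
  have hne2 : ∀ p ∈ pvFlatten 0 pvCatRules, p.1 ≠ [] := by decide
  have hcat := pv_scan_eq_chain category.toList "Technology Innovation" "Technology Innovation"
      pvCatRules hne2
  have htitle := pv_scan_eq_chain (PySem.Str.lower title).toList "Technology Innovation"
      (pvChain category.toList "Technology Innovation" pvCatRules) pvTitleRules hne1
  have key : extract_business_trend_name_py_alt title category
      = (match pvBestRank (PySem.Str.lower title).toList (pvFlatten 0 pvTitleRules) with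
         | some r => (pvTitleRules.map Prod.snd).getD r "Technology Innovation"
         | none => pvChain category.toList "Technology Innovation" pvCatRules) := by
    simp only [extract_business_trend_name_py_alt, pvTitleTerms, pvTitleNames, pvCatTerms,
      pvCatNames]
    cases pvBestRank (PySem.Str.lower title).toList (pvFlatten 0 pvTitleRules) with
    | some r => rfl
    | none => exact hcat
  rw [key, htitle]
  simp only [extract_business_trend_name_py, pvChain, pvTitleRules, pvCatRules,
    List.any_cons, List.any_nil, Bool.or_false, PySem.Str.isIn_eq]
  rfl
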